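-- pv_equiv track=rewrite | github.com/pypi-data/pypi-mirror-356 | packages/quickstats/quickstats-0.8.4.0.tar.gz/quickstats-0.8.4.0/quickstats/maths/numerics.py | get_batch_slice_indices
-- ===== SOURCE A (Python) =====
-- def get_batch_slice_indices(totalsize: int, batchsize: int, drop_remainder: bool = False):
--     """
--     Generates start and end indices for batch slicing.
--
--     Parameters
--     ----------
--     totalsize : int
--         Total size of the data.
--     batchsize : int
--         Size of each batch.
--     drop_remainder : bool, optional
--         Whether to drop the last batch if it is smaller than the batch size.
--
--     Yields
--     ------
--     tuple of int
--         Start and end indices for each batch.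
--     """
--     if not ((totalsize > 0) and (batchsize > 0)):
--         raise ValueError("Total size and batch size must be greater than zero")
--     for i in range(0, totalsize, batchsize):
--         end = min(i + batchsize, totalsize)
--         if drop_remainder and (end - i) < batchsize:
--             break
--         yield (i, min(i + batchsize, totalsize))
-- ===== SOURCE B (Python) =====
-- def get_batch_slice_indices(totalsize: int, batchsize: int, drop_remainder: bool = False):
--     if not ((totalsize > 0) and (batchsize > 0)):
--         raise ValueError("Total size and batch size must be greater than zero")
--     # Build the list of cut points 0, b, 2b, ..., then pair consecutive cut points.
--     cuts = list(range(0, totalsize + 1, batchsize))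
--     if totalsize % batchsize != 0 and not drop_remainder:
--         cuts = cuts + [totalsize]
--     yield from zip(cuts, cuts[1:])
-- ===== Notes on version B (the rewrite author's own statement) =====
-- stated objective: alternative
-- what changed: Instead of looping over batch starts with a per-iteration min-clamp and conditional break, B builds the list of cut points 0, b, 2b, ... (plus the clamped tail cut when a remainder is kept) and produces the batches by zipping consecutive cut points.
import Mathlib
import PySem

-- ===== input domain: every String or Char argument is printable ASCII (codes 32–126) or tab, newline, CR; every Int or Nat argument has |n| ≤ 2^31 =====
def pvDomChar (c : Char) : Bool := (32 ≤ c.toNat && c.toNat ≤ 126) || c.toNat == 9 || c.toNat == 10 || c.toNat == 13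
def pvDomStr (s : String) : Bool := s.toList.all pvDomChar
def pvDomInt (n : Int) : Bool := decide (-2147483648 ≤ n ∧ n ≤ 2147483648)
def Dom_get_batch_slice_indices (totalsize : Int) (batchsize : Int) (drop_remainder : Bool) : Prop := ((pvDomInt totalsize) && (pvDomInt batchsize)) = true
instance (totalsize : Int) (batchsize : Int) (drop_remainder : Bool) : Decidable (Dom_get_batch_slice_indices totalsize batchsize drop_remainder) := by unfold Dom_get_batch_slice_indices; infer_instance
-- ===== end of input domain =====

-- B replaces A's loop over batch starts (with per-iteration min-clamp and conditional break) by
-- building the list of cut points and zipping consecutive cut points (objective: alternative).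

-- ===== PORT A =====
-- for i in range(0, totalsize, batchsize): end = min(i+batchsize, totalsize);
--   if drop_remainder and (end - i) < batchsize: break;  yield (i, min(i+batchsize, totalsize))
def pvALoop (totalsize : Int) (batchsize : Int) (drop_remainder : Bool) : List Int → List (Int × Int)
  | [] => []
  | i :: rest =>
      let e := min (i + batchsize) totalsize
      if drop_remainder && decide (e - i < batchsize) then []
      else (i, min (i + batchsize) totalsize) :: pvALoop totalsize batchsize drop_remainder rest

def get_batch_slice_indices (totalsize : Int) (batchsize : Int) (drop_remainder : Bool) : List (Int × Int) :=
  if ¬(totalsize > 0 ∧ batchsize > 0) then []   -- raise ValueError: outside Pre_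
  else pvALoop totalsize batchsize drop_remainder (PySem.List.pyRange 0 totalsize batchsize)

-- ===== PORT B =====
-- cuts = list(range(0, totalsize + 1, batchsize));
-- if totalsize % batchsize != 0 and not drop_remainder: cuts = cuts + [totalsize];
-- yield from zip(cuts, cuts[1:])
-- cuts = list(range(0, totalsize + 1, batchsize)), plus the final cut `totalsize` when a remainder is kept
def pvCuts (totalsize : Int) (batchsize : Int) (drop_remainder : Bool) : List Int :=
  let cuts0 := PySem.List.pyRange 0 (totalsize + 1) batchsize
  if PySem.Int.mod totalsize batchsize ≠ 0 ∧ drop_remainder = false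
  then cuts0 ++ [totalsize] else cuts0

def get_batch_slice_indices_alt (totalsize : Int) (batchsize : Int) (drop_remainder : Bool) : List (Int × Int) :=
  if ¬(totalsize > 0 ∧ batchsize > 0) then []   -- raise ValueError: outside Pre_
  else
    (pvCuts totalsize batchsize drop_remainder).zip
      (PySem.List.slice (pvCuts totalsize batchsize drop_remainder) (some 1) none)   -- zip(cuts, cuts[1:])

-- ===== PRECONDITION & SPEC =====
-- Pre_ excludes exactly the inputs on which A raises ValueError (totalsize ≤ 0 or batchsize ≤ 0).
def Pre_get_batch_slice_indices (totalsize : Int) (batchsize : Int) (drop_remainder : Bool) : Prop :=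
  totalsize > 0 ∧ batchsize > 0
instance (totalsize : Int) (batchsize : Int) (drop_remainder : Bool) : Decidable (Pre_get_batch_slice_indices totalsize batchsize drop_remainder) := by unfold Pre_get_batch_slice_indices; infer_instance

def pvWitness_get_batch_slice_indices : Int × Int × Bool := (10, 3, false)

def Spec_get_batch_slice_indices (totalsize : Int) (batchsize : Int) (drop_remainder : Bool) (out : List (Int × Int)) : Prop := out = get_batch_slice_indices_alt totalsize batchsize drop_remainder
instance (totalsize : Int) (batchsize : Int) (drop_remainder : Bool) (out : List (Int × Int)) : Decidable (Spec_get_batch_slice_indices totalsize batchsize drop_remainder out) := by unfold Spec_get_batch_slice_indices; infer_instance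

-- ===== CLAIM (what is proved, stated in full; the proofs are below) =====
def Claim_equal_get_batch_slice_indices : Prop := ∀ (totalsize : Int) (batchsize : Int) (drop_remainder : Bool), Dom_get_batch_slice_indices totalsize batchsize drop_remainder → Pre_get_batch_slice_indices totalsize batchsize drop_remainder → Spec_get_batch_slice_indices totalsize batchsize drop_remainder (get_batch_slice_indices totalsize batchsize drop_remainder)

-- ===== LEMMAS AND PROOFS =====

-- The loop never breaks on a full batch i (i + batchsize ≤ totalsize) and yields (i, i+batchsize).
theorem pvALoop_full (t b : Int) (d : Bool) (ks : List Int) (tail : List Int)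
    (h : ∀ i ∈ ks, i + b ≤ t) :
    pvALoop t b d (ks ++ tail)
      = (ks.map (fun i => (i, i + b))) ++ pvALoop t b d tail := by
  induction ks with
  | nil => simp
  | cons i ks ih =>
      have hk : i + b ≤ t := h i (List.mem_cons_self ..)
      have hmin : min (i + b) t = i + b := min_eq_left hk
      simp only [List.map_cons, List.cons_append, pvALoop, hmin]
      have hcond : (d && decide (i + b - i < b)) = false := by
        rw [show i + b - i = b from by ring]
        simp
      rw [hcond]
      simp only [Bool.false_eq_true, if_false]
      rw [ih (fun i hi => h i (List.mem_cons_of_mem _ hi))]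

-- Zipping the values of g on consecutive indices with its shift pairs consecutive values.
theorem zip_adjacent {α : Type} (g : Nat → α) : ∀ (n a : Nat),
    List.zip (List.map g (List.range' a (n + 1))) (List.map g (List.range' (a + 1) n))
      = List.map (fun k => (g k, g (k + 1))) (List.range' a n) := by
  intro n
  induction n with
  | zero => intro a; simp [List.range'_succ]
  | succ n ih =>
      intro a
      rw [show List.range' a (n + 1 + 1) = a :: List.range' (a + 1) (n + 1) from List.range'_succ]
      simp only [List.map_cons]
      nth_rewrite 2 [show List.range' (a + 1) (n + 1) = (a + 1) :: List.range' (a + 1 + 1) n from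
        List.range'_succ]
      simp only [List.map_cons, List.zip_cons_cons]
      rw [ih (a + 1)]
      rw [show List.range' a (n + 1) = a :: List.range' (a + 1) n from List.range'_succ]
      simp only [List.map_cons]

-- zip(cuts, cuts[1:]) for cuts = map g (range (m+1)) pairs consecutive values of g.
theorem zip_slice_adjacent {α : Type} (g : Nat → α) (m : Nat) :
    (((List.range' 0 (m + 1)).map g).zip
      (PySem.List.slice ((List.range' 0 (m + 1)).map g) (some 1) none))
      = (List.range' 0 m).map (fun k => (g k, g (k + 1))) := by
  rw [PySem.List.slice_from _ (by norm_num : (0:Int) ≤ 1)]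
  have h1 : ((List.range' 0 (m + 1)).map g).drop (1:Int).toNat = (List.range' 1 m).map g := by
    rw [show List.range' 0 (m + 1) = 0 :: List.range' 1 m from by
      rw [List.range'_succ]]
    simp
  rw [h1]
  have := zip_adjacent g m 0
  simpa using this

theorem get_batch_slice_indices_spec : Claim_equal_get_batch_slice_indices := by
  intro t b d _ hpre
  obtain ⟨ht, hb⟩ := hpre
  unfold Spec_get_batch_slice_indices get_batch_slice_indices get_batch_slice_indices_alt pvCuts
  rw [if_neg (by simp [ht, hb]), if_neg (by simp [ht, hb])]
  simp only [PySem.Int.mod_eq_emod_of_pos hb]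
  -- decompose t = b * N + r, 0 ≤ r < b
  have hfull0 : 0 ≤ t / b := Int.ediv_nonneg (le_of_lt ht) (le_of_lt hb)
  obtain ⟨N, hNf⟩ : ∃ N : Nat, (N : Int) = t / b := ⟨(t / b).toNat, Int.toNat_of_nonneg hfull0⟩
  obtain ⟨r, hr, hr0, hrb⟩ : ∃ r : Int, t = b * (N : Int) + r ∧ 0 ≤ r ∧ r < b := by
    refine ⟨t % b, ?_, Int.emod_nonneg t (by omega), Int.emod_lt_of_pos t hb⟩
    rw [hNf]; exact (Int.mul_ediv_add_emod t b).symm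
  have hmod : t % b = r := by
    rw [hr, add_comm, Int.add_mul_emod_self_left, Int.emod_eq_of_lt hr0 hrb]
  rw [hmod]
  -- unfold both pyRanges into maps over List.range'
  rw [PySem.List.pyRange_of_pos 0 t hb, PySem.List.pyRange_of_pos 0 (t + 1) hb,
      if_pos (show (0:Int) < t from ht), if_pos (show (0:Int) < t + 1 from by omega)]
  have hceilA : ((t - 0 + b - 1) / b).toNat = N + (if r = 0 then 0 else 1) := by
    by_cases h0 : r = 0
    · have e1 : t - 0 + b - 1 = (b - 1) + (N : Int) * b := by rw [hr, h0]; ring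
      rw [e1, Int.add_mul_ediv_right _ _ (by omega : b ≠ 0),
          Int.ediv_eq_zero_of_lt (by omega) (by omega)]
      simp [h0]
    · have e1 : t - 0 + b - 1 = (r - 1) + ((N : Int) + 1) * b := by rw [hr]; ring
      rw [e1, Int.add_mul_ediv_right _ _ (by omega : b ≠ 0),
          Int.ediv_eq_zero_of_lt (by omega) (by omega)]
      rw [if_neg h0]
      omega
  have hceilB : ((t + 1 - 0 + b - 1) / b).toNat = N + 1 := by
    by_cases h0 : r = 0
    · have e1 : t + 1 - 0 + b - 1 = 0 + ((N : Int) + 1) * b := by rw [hr, h0]; ring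
      rw [e1, Int.add_mul_ediv_right _ _ (by omega : b ≠ 0), Int.zero_ediv]
      omega
    · have e1 : t + 1 - 0 + b - 1 = r + ((N : Int) + 1) * b := by rw [hr]; ring
      rw [e1, Int.add_mul_ediv_right _ _ (by omega : b ≠ 0),
          Int.ediv_eq_zero_of_lt (by omega) (by omega)]
      omega
  rw [hceilA, hceilB, List.range_eq_range', List.range_eq_range']
  simp only [zero_add]
  -- all batch starts b*k with k < N are full batches
  have hfullb : ∀ i ∈ (List.range' 0 N).map (fun k : Nat => b * (k : Int)), i + b ≤ t := by
    intro i hi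
    obtain ⟨k, hk, rfl⟩ := List.mem_map.mp hi
    rw [List.mem_range'_1] at hk
    have h1 : ((k : Int) + 1) ≤ (N : Int) := by have := hk.2; omega
    have h2 : b * ((k : Int) + 1) ≤ b * (N : Int) := by
      exact mul_le_mul_of_nonneg_left h1 (le_of_lt hb)
    nlinarith
  by_cases hcase : ¬ r = 0 ∧ d = false
  · -- remainder kept: B appends the cut t; A yields the clamped tail pair
    obtain ⟨h0, hd⟩ := hcase
    rw [if_pos (show (¬ r = 0 ∧ d = false) from ⟨h0, hd⟩)]
    -- B's cuts = map g (range' 0 (N+2)) with g clamping the last cut to t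
    have hcuts : (List.range' 0 (N + 1)).map (fun k : Nat => b * (k : Int)) ++ [t]
          = (List.range' 0 (N + 1 + 1)).map (fun k : Nat => if k ≤ N then b * (k : Int) else t) := by
      rw [show List.range' 0 (N + 1 + 1) = List.range' 0 (N + 1) ++ [0 + (N + 1)] from
        List.range'_1_concat, List.map_append]
      congr 1
      · apply List.map_congr_left
        intro k hk
        rw [List.mem_range'_1] at hk
        rw [if_pos (by omega : k ≤ N)]
      · simp only [List.map_cons, List.map_nil]
        rw [if_neg (by omega)]
    rw [hcuts, zip_slice_adjacent, if_neg h0]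
    -- A's side: N+1 starts, the last yields the clamped pair
    rw [show List.range' 0 (N + 1) = List.range' 0 N ++ [0 + N] from List.range'_1_concat,
        List.map_append]
    simp only [List.map_cons, List.map_nil, Nat.zero_add]
    rw [pvALoop_full t b d _ _ hfullb]
    have htail : pvALoop t b d [b * (N : Int)] = [(b * (N : Int), t)] := by
      have hmin : min (b * (N : Int) + b) t = t := min_eq_right (by omega)
      simp only [pvALoop, hmin]
      rw [if_neg (by simp [hd])]
    rw [htail, List.map_map]
    -- B's pair range is already split at N
    simp only [List.map_append, List.map_cons, List.map_nil]
    congr 1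
    · apply List.map_congr_left
      intro k hk
      rw [List.mem_range'_1] at hk
      rw [if_pos (by omega : k ≤ N), if_pos (by omega : k + 1 ≤ N)]
      simp only [Function.comp_apply, Prod.mk.injEq]
      constructor <;> push_cast <;> ring
    · rw [if_pos (le_refl N), if_neg (by omega : ¬ N + 1 ≤ N)]
  · -- no appended cut: either exact division, or the partial batch is dropped
    rw [if_neg hcase]
    rw [zip_slice_adjacent]
    by_cases h0 : r = 0
    · -- exact division: A's range has exactly N full starts
      rw [if_pos h0]
      have := pvALoop_full t b d ((List.range' 0 N).map (fun k : Nat => b * (k : Int))) [] hfullb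
      simp only [List.append_nil, pvALoop] at this
      rw [show N + 0 = N from rfl, this, List.map_map]
      apply List.map_congr_left
      intro k _
      simp only [Function.comp_apply, Prod.mk.injEq]
      constructor <;> push_cast <;> ring
    · -- remainder dropped (d = true): A breaks at the last (partial) start
      have hd : d = true := by
        rcases Bool.eq_false_or_eq_true d with h | h
        · exact h
        · exact absurd ⟨h0, h⟩ hcase
      rw [if_neg h0]
      rw [show List.range' 0 (N + 1) = List.range' 0 N ++ [0 + N] from List.range'_1_concat,
          List.map_append]
      simp only [List.map_cons, List.map_nil, Nat.zero_add]
      rw [pvALoop_full t b d _ _ hfullb]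
      have htail : pvALoop t b d [b * (N : Int)] = [] := by
        have hmin : min (b * (N : Int) + b) t = t := min_eq_right (by omega)
        simp only [pvALoop, hmin]
        rw [if_pos (by simp [hd]; omega)]
      rw [htail, List.append_nil, List.map_map]
      apply List.map_congr_left
      intro k _
      simp only [Function.comp_apply, Prod.mk.injEq]
      constructor <;> push_cast <;> ring
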